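-- pv_equiv track=rewrite | github.com/Miguel-Deza/BIO_FINAL_PROJECT | main.py | compute_energy_matrix
-- ===== SOURCE A (Python) =====
-- def compute_energy_matrix(sequence, alpha):
--     length = len(sequence)
--     energy_matrix = [[0] * length for _ in range(length)]
--
--     for gap in range(1, length):
--         for i in range(length - gap):
--             j = i + gap
--             min_energy = float('inf')
--             min_energy = min(min_energy, energy_matrix[i + 1][j])
--             min_energy = min(min_energy, energy_matrix[i][j - 1])
--             if sequence[i] + sequence[j] in ['CG', 'GC', 'AU', 'UA', 'GU', 'UG']:
--                 min_energy = min(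
--                     min_energy, energy_matrix[i + 1][j - 1] + alpha[sequence[i] + sequence[j]])
--             for k in range(i + 1, j):
--                 min_energy = min(
--                     min_energy, energy_matrix[i][k - 1] + energy_matrix[k][j])
--
--             energy_matrix[i][j] = min_energy
--
--     return energy_matrix
-- ===== SOURCE B (Python) =====
-- def compute_energy_matrix(sequence, alpha):
--     length = len(sequence)
--     valid = {'CG', 'GC', 'AU', 'UA', 'GU', 'UG'}
--     memo = {}
--
--     def best(i, j):
--         if i >= j:
--             return 0
--         if (i, j) in memo:
--             return memo[(i, j)]
--         e = best(i + 1, j)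
--         e = min(e, best(i, j - 1))
--         pair = sequence[i] + sequence[j]
--         if pair in valid:
--             e = min(e, best(i + 1, j - 1) + alpha[pair])
--         for k in range(i + 1, j):
--             e = min(e, best(i, k - 1) + best(k, j))
--         memo[(i, j)] = e
--         return e
--
--     return [[best(i, j) if i < j else 0 for j in range(length)]
--             for i in range(length)]
-- ===== Notes on version B (the rewrite author's own statement) =====
-- stated objective: alternative
-- what changed: Bottom-up gap-diagonal iteration over a mutated matrix is replaced by a top-down memoized recursion best(i,j) with a dict cache, and the result matrix is built as a comprehension from the cache.
import Mathlib
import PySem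

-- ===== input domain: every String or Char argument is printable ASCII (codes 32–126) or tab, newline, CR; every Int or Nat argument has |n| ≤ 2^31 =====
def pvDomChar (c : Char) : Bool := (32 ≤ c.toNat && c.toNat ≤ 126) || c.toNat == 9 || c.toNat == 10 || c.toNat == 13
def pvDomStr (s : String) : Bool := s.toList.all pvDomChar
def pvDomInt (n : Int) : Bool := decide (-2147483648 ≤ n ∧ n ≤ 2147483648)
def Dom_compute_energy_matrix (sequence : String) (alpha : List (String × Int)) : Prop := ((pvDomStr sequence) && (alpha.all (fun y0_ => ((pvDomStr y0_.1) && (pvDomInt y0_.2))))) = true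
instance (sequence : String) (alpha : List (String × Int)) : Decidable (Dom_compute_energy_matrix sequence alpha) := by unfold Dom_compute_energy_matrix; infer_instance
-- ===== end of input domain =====

-- B replaces A's bottom-up gap-diagonal iteration over a mutated matrix with a top-down memoized recursion (objective: alternative decomposition; no speed claim).

-- ===== PORT A =====
-- the six Watson-Crick/wobble pair strings of A's literal list
def pvValid : List String := ["CG", "GC", "AU", "UA", "GU", "UG"]
-- sequence[i] + sequence[j] (indices always in range where used; getD is exact there)
def pvPair (l : List Char) (i j : Nat) : String := String.ofList [l.getD i ' ', l.getD j ' ']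
-- alpha[pair]: dict lookup = first match in the association list (KeyError excluded by Pre_; getD 0 unreached there)
def pvAlphaGet (alpha : List (String × Int)) (s : String) : Int := ((PySem.Dict.mk alpha).get? s).getD 0
-- body of A's cell update: min_energy starts at float('inf'), and min(inf, x) = x for every int x,
-- so the first min is exactly the first matrix read (exact: the chain is over ints from there on)
def pvCellA (l : List Char) (alpha : List (String × Int)) (m : List (List Int)) (i j : Nat) : Int :=
  let e1 := (m.getD (i + 1) []).getD j 0
  let e2 := min e1 ((m.getD i []).getD (j - 1) 0)
  let e3 := if pvPair l i j ∈ pvValid then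
      min e2 ((m.getD (i + 1) []).getD (j - 1) 0 + pvAlphaGet alpha (pvPair l i j))
    else e2
  (List.range' (i + 1) (j - (i + 1))).foldl
    (fun acc k => min acc ((m.getD i []).getD (k - 1) 0 + (m.getD k []).getD j 0)) e3

def compute_energy_matrix (sequence : String) (alpha : List (String × Int)) : List (List Int) :=
  let l := sequence.toList
  let n := l.length
  let init : List (List Int) := List.replicate n (List.replicate n 0)
  (List.range' 1 (n - 1)).foldl (fun m gap =>
    (List.range (n - gap)).foldl (fun m i =>
      let j := i + gap
      m.set i ((m.getD i []).set j (pvCellA l alpha m i j))) m) init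

-- ===== PORT B =====
-- best(i, j) with the memo dict threaded through; fuel only makes the same recursion total
-- (fuel = n suffices: every recursive call shrinks j - i, which starts < n)
def pvBest (l : List Char) (alpha : List (String × Int)) :
    Nat → PySem.Dict (Nat × Nat) Int → Nat → Nat → Int × PySem.Dict (Nat × Nat) Int
  | 0, memo, _, _ => (0, memo)
  | fuel + 1, memo, i, j =>
    if j ≤ i then (0, memo)
    else
      match memo.get? (i, j) with
      | some v => (v, memo)
      | none =>
        let r1 := pvBest l alpha fuel memo (i + 1) j
        let r2 := pvBest l alpha fuel r1.2 i (j - 1)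
        let e2 := min r1.1 r2.1
        let r3 := if pvPair l i j ∈ pvValid then
            let rp := pvBest l alpha fuel r2.2 (i + 1) (j - 1)
            (min e2 (rp.1 + pvAlphaGet alpha (pvPair l i j)), rp.2)
          else (e2, r2.2)
        let r4 := (List.range' (i + 1) (j - (i + 1))).foldl
            (fun st k =>
              let s1 := pvBest l alpha fuel st.2 i (k - 1)
              let s2 := pvBest l alpha fuel s1.2 k j
              (min st.1 (s1.1 + s2.1), s2.2)) r3
        (r4.1, r4.2.insert (i, j) r4.1)

def compute_energy_matrix_alt (sequence : String) (alpha : List (String × Int)) : List (List Int) :=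
  let l := sequence.toList
  let n := l.length
  ((List.range n).foldl (fun st i =>
      let r := (List.range n).foldl (fun st2 j =>
          if i < j then
            let b := pvBest l alpha n st2.2 i j
            (st2.1 ++ [b.1], b.2)
          else (st2.1 ++ [(0 : Int)], st2.2)) (([] : List Int), st.2)
      (st.1 ++ [r.1], r.2)) (([] : List (List Int)), (PySem.Dict.empty : PySem.Dict (Nat × Nat) Int))).1

-- ===== PRECONDITION & SPEC =====
-- Pre_ excludes exactly the inputs where the Python raises KeyError: some i < j whose characters form a
-- valid pair string that is not a key of alpha (both A and B look that key up and raise there).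
def Pre_compute_energy_matrix (sequence : String) (alpha : List (String × Int)) : Prop :=
  ∀ i ∈ List.range sequence.toList.length, ∀ j ∈ List.range sequence.toList.length, i < j →
    pvPair sequence.toList i j ∈ pvValid →
    ((PySem.Dict.mk alpha).get? (pvPair sequence.toList i j)).isSome = true
instance (sequence : String) (alpha : List (String × Int)) : Decidable (Pre_compute_energy_matrix sequence alpha) := by unfold Pre_compute_energy_matrix; infer_instance
def pvWitness_compute_energy_matrix : String × (List (String × Int)) := ("GCAU", [("GC", -3), ("AU", -2), ("GU", 1)])
def Spec_compute_energy_matrix (sequence : String) (alpha : List (String × Int)) (out : List (List Int)) : Prop := out = compute_energy_matrix_alt sequence alpha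
instance (sequence : String) (alpha : List (String × Int)) (out : List (List Int)) : Decidable (Spec_compute_energy_matrix sequence alpha out) := by unfold Spec_compute_energy_matrix; infer_instance

-- ===== CLAIM (what is proved, stated in full; the proofs are below) =====
def Claim_equal_compute_energy_matrix : Prop := ∀ (sequence : String) (alpha : List (String × Int)), Dom_compute_energy_matrix sequence alpha → Pre_compute_energy_matrix sequence alpha → Spec_compute_energy_matrix sequence alpha (compute_energy_matrix sequence alpha)

-- ===== LEMMAS AND PROOFS =====

-- the common Nussinov recurrence both programs compute, by recursion on the interval width
def pvE (l : List Char) (alpha : List (String × Int)) (i j : Nat) : Int :=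
  if j ≤ i then 0
  else
    let e1 := pvE l alpha (i + 1) j
    let e2 := min e1 (pvE l alpha i (j - 1))
    let e3 := if pvPair l i j ∈ pvValid then
        min e2 (pvE l alpha (i + 1) (j - 1) + pvAlphaGet alpha (pvPair l i j))
      else e2
    ((List.range' (i + 1) (j - (i + 1))).attach).foldl
      (fun acc k => min acc (pvE l alpha i (k.1 - 1) + pvE l alpha k.1 j)) e3
termination_by (j - i)
decreasing_by
  · omega
  · omega
  · omega
  · have hk := List.mem_range'_1.mp k.2; omega
  · have hk := List.mem_range'_1.mp k.2; omega

theorem pvE_of_le (l : List Char) (alpha : List (String × Int)) {i j : Nat} (h : j ≤ i) :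
    pvE l alpha i j = 0 := by rw [pvE]; simp [h]

-- unfolding of pvE on i < j, with the attach-fold replaced by a plain fold
theorem pvE_of_lt (l : List Char) (alpha : List (String × Int)) {i j : Nat} (h : i < j) :
    pvE l alpha i j =
      (List.range' (i + 1) (j - (i + 1))).foldl
        (fun acc k => min acc (pvE l alpha i (k - 1) + pvE l alpha k j))
        (if pvPair l i j ∈ pvValid then
            min (min (pvE l alpha (i + 1) j) (pvE l alpha i (j - 1)))
              (pvE l alpha (i + 1) (j - 1) + pvAlphaGet alpha (pvPair l i j))
          else min (pvE l alpha (i + 1) j) (pvE l alpha i (j - 1))) := by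
  rw [pvE]
  simp only [if_neg (show ¬ j ≤ i by omega)]
  exact List.foldl_attach (f := fun acc k => min acc (pvE l alpha i (k - 1) + pvE l alpha k j))

-- the matrix whose (i, j) entry is pvE where i < j and f i j, else 0
def pvM (l : List Char) (alpha : List (String × Int)) (n : Nat) (f : Nat → Nat → Bool) : List (List Int) :=
  (List.range n).map fun i => (List.range n).map fun j =>
    if i < j ∧ f i j = true then pvE l alpha i j else 0

theorem pvM_congr (l : List Char) (alpha : List (String × Int)) (n : Nat) {f g : Nat → Nat → Bool}
    (h : ∀ a b, a < n → b < n → a < b → f a b = g a b) :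
    pvM l alpha n f = pvM l alpha n g := by
  unfold pvM
  refine List.map_congr_left (fun a ha => List.map_congr_left (fun b hb => ?_))
  rw [List.mem_range] at ha hb
  by_cases hab : a < b
  · rw [h a b ha hb hab]
  · simp [hab]

theorem pvM_read (l : List Char) (alpha : List (String × Int)) (n : Nat) (f : Nat → Nat → Bool)
    {a b : Nat} (ha : a < n) (hb : b < n) (hf : a < b → f a b = true) :
    (((pvM l alpha n f).getD a []).getD b 0) = pvE l alpha a b := by
  unfold pvM
  rw [PySem.List.getD_map_range _ _ _ _ ha, PySem.List.getD_map_range _ _ _ _ hb]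
  by_cases hab : a < b
  · simp [hab, hf hab]
  · rw [if_neg (by tauto), pvE_of_le l alpha (by omega)]

theorem set_map_range {β : Type} (f : Nat → β) (n i : Nat) (v : β) :
    ((List.range n).map f).set i v = (List.range n).map (fun a => if a = i then v else f a) := by
  apply List.ext_getElem
  · simp
  · intro k h1 h2
    simp only [List.getElem_set, List.getElem_map, List.getElem_range]
    simp only [List.length_set, List.length_map, List.length_range] at h1
    by_cases hk : k = i
    · simp [hk]
    · simp [hk, Ne.symm hk]

theorem pvM_update (l : List Char) (alpha : List (String × Int)) (n : Nat) (f : Nat → Nat → Bool)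
    {i j : Nat} (hij : i < j) (hi : i < n) (hj : j < n) {v : Int} (hv : v = pvE l alpha i j) :
    (pvM l alpha n f).set i (((pvM l alpha n f).getD i []).set j v)
      = pvM l alpha n (fun a b => f a b || (decide (a = i) && decide (b = j))) := by
  unfold pvM
  rw [PySem.List.getD_map_range _ _ _ _ hi, set_map_range, set_map_range]
  refine List.map_congr_left (fun a ha => ?_)
  rw [List.mem_range] at ha
  by_cases hai : a = i
  · subst hai
    rw [if_pos rfl]
    refine List.map_congr_left (fun b hb => ?_)
    by_cases hbj : b = j
    · subst hbj
      simp [hij, hv]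
    · simp [hbj]
  · simp [hai]

-- the cell A computes at (i, j) from a matrix already correct strictly below diagonal-distance g equals pvE i j
theorem cellA_correct (l : List Char) (alpha : List (String × Int)) (n : Nat)
    (f : Nat → Nat → Bool) {g i : Nat} (hg : 1 ≤ g) (hi : i < n - g)
    (hf : ∀ a b, a < b → b - a < g → f a b = true) :
    pvCellA l alpha (pvM l alpha n f) i (i + g) = pvE l alpha i (i + g) := by
  have hj : i + g < n := by omega
  unfold pvCellA
  rw [pvM_read l alpha n f (by omega) hj (fun h => hf _ _ h (by omega)),
      pvM_read l alpha n f (by omega) (by omega) (fun h => hf _ _ h (by omega)),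
      pvM_read l alpha n f (by omega) (by omega) (fun h => hf _ _ h (by omega)),
      pvE_of_lt l alpha (show i < i + g by omega)]
  exact PySem.List.foldl_congr_mem _ _ _ _ (fun acc k hk => by
    have hk' := List.mem_range'_1.mp hk
    rw [pvM_read l alpha n f (by omega) (by omega) (fun h => hf _ _ h (by omega)),
        pvM_read l alpha n f (by omega) hj (fun h => hf _ _ h (by omega))])

-- ===== A-side: the double fold produces pvM =====

def pvFull (g : Nat) : Nat → Nat → Bool := fun a b => decide (b - a ≤ g)
def pvPartial (g i0 : Nat) : Nat → Nat → Bool := fun a b => decide (b - a < g) || (decide (b - a = g) && decide (a < i0))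

theorem innerFold_correct (l : List Char) (alpha : List (String × Int)) (n g : Nat) (hg : 1 ≤ g) :
    ∀ (t i0 : Nat), i0 + t = n - g →
    (List.range' i0 t).foldl (fun m i => m.set i ((m.getD i []).set (i + g) (pvCellA l alpha m i (i + g))))
        (pvM l alpha n (pvPartial g i0))
      = pvM l alpha n (pvPartial g (i0 + t)) := by
  intro t
  induction t with
  | zero => intro i0 _; rfl
  | succ t ih =>
    intro i0 h0
    rw [List.range'_succ, List.foldl_cons]
    rw [cellA_correct l alpha n (pvPartial g i0) hg (show i0 < n - g by omega)
          (fun a b hab hlt => by rw [Bool.eq_iff_iff]; simp [pvPartial]; omega)]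
    rw [pvM_update l alpha n (pvPartial g i0) (by omega) (by omega) (by omega) rfl]
    rw [pvM_congr l alpha n
          (g := pvPartial g (i0 + 1))
          (fun a b _ _ hab => by rw [Bool.eq_iff_iff]; simp [pvPartial]; omega)]
    rw [ih (i0 + 1) (by omega)]
    have : i0 + 1 + t = i0 + (t + 1) := by omega
    rw [this]

theorem outerFold_correct (l : List Char) (alpha : List (String × Int)) (n : Nat) :
    ∀ (t g0 : Nat), 1 ≤ g0 →
    (List.range' g0 t).foldl (fun m gap =>
        (List.range (n - gap)).foldl (fun m i => m.set i ((m.getD i []).set (i + gap) (pvCellA l alpha m i (i + gap)))) m)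
        (pvM l alpha n (pvFull (g0 - 1)))
      = pvM l alpha n (pvFull (g0 - 1 + t)) := by
  intro t
  induction t with
  | zero => intro g0 _; rfl
  | succ t ih =>
    intro g0 hg0
    simp only [List.range'_succ, List.foldl_cons]
    rw [List.range_eq_range',
        pvM_congr l alpha n (g := pvPartial g0 0)
          (fun a b _ _ hab => by rw [Bool.eq_iff_iff]; simp [pvPartial, pvFull]; omega),
        innerFold_correct l alpha n g0 hg0 (n - g0) 0 (by omega),
        pvM_congr l alpha n (g := pvFull g0)
          (fun a b _ hb hab => by rw [Bool.eq_iff_iff]; simp [pvPartial, pvFull]; omega)]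
    have h1 : pvFull g0 = pvFull (g0 + 1 - 1) := by simp
    rw [h1, ih (g0 + 1) (by omega)]
    have h2 : g0 + 1 - 1 + t = g0 - 1 + (t + 1) := by omega
    rw [h2]

theorem portA_eq (sequence : String) (alpha : List (String × Int)) :
    compute_energy_matrix sequence alpha
      = pvM sequence.toList alpha sequence.toList.length (fun _ _ => true) := by
  have key : ∀ (l : List Char) (n : Nat),
      (List.range' 1 (n - 1)).foldl (fun m gap =>
          (List.range (n - gap)).foldl
            (fun m i => m.set i ((m.getD i []).set (i + gap) (pvCellA l alpha m i (i + gap)))) m)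
        (List.replicate n (List.replicate n (0 : Int)))
      = pvM l alpha n (fun _ _ => true) := by
    intro l n
    have hinit : List.replicate n (List.replicate n (0 : Int)) = pvM l alpha n (pvFull 0) := by
      unfold pvM
      have h1 : ∀ i : Nat,
          (List.range n).map (fun j => if i < j ∧ pvFull 0 i j = true then pvE l alpha i j else 0)
            = List.replicate n (0 : Int) := by
        intro i
        rw [List.map_congr_left (fun j _ => if_neg (by simp only [pvFull, decide_eq_true_eq]; omega))]
        simp [List.map_const']
      rw [List.map_congr_left (fun i _ => h1 i)]
      simp [List.map_const']
    rw [hinit, show (0 : Nat) = 1 - 1 from rfl,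
        outerFold_correct l alpha n (n - 1) 1 (le_refl 1)]
    exact pvM_congr _ _ _ (fun a b _ hb hab => by rw [Bool.eq_iff_iff]; simp [pvFull]; omega)
  exact key sequence.toList sequence.toList.length

-- ===== B-side: memoized recursion computes pvE =====

def pvInv (l : List Char) (alpha : List (String × Int)) (memo : PySem.Dict (Nat × Nat) Int) : Prop :=
  ∀ i j v, memo.get? (i, j) = some v → v = pvE l alpha i j

theorem pvBest_sound (l : List Char) (alpha : List (String × Int)) :
    ∀ (fuel i j : Nat) (memo : PySem.Dict (Nat × Nat) Int), j - i ≤ fuel → pvInv l alpha memo →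
      (pvBest l alpha fuel memo i j).1 = pvE l alpha i j ∧ pvInv l alpha (pvBest l alpha fuel memo i j).2 := by
  intro fuel
  induction fuel with
  | zero =>
    intro i j memo hf hm
    exact ⟨(pvE_of_le l alpha (by omega)).symm, hm⟩
  | succ fuel ih =>
    intro i j memo hf hm
    by_cases hji : j ≤ i
    · simp only [pvBest, if_pos hji]
      exact ⟨(pvE_of_le l alpha hji).symm, hm⟩
    · simp only [pvBest, if_neg hji]
      cases hget : memo.get? (i, j) with
      | some v => exact ⟨hm i j v hget, hm⟩
      | none =>
        simp only []
        obtain ⟨h1v, h1m⟩ := ih (i + 1) j memo (by omega) hm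
        obtain ⟨h2v, h2m⟩ := ih i (j - 1) _ (by omega) h1m
        -- the bifurcation fold, relative to any sound memo and seed
        have foldLem : ∀ (ks : List Nat), (∀ k ∈ ks, i < k ∧ k < j) →
            ∀ (acc : Int) (m : PySem.Dict (Nat × Nat) Int), pvInv l alpha m →
            (ks.foldl (fun st k =>
                let s1 := pvBest l alpha fuel st.2 i (k - 1)
                let s2 := pvBest l alpha fuel s1.2 k j
                (min st.1 (s1.1 + s2.1), s2.2)) (acc, m)).1
              = ks.foldl (fun a k => min a (pvE l alpha i (k - 1) + pvE l alpha k j)) acc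
            ∧ pvInv l alpha ((ks.foldl (fun st k =>
                let s1 := pvBest l alpha fuel st.2 i (k - 1)
                let s2 := pvBest l alpha fuel s1.2 k j
                (min st.1 (s1.1 + s2.1), s2.2)) (acc, m)).2) := by
          intro ks
          induction ks with
          | nil => exact fun _ acc m hmm => ⟨rfl, hmm⟩
          | cons k ks ihk =>
            intro hks acc m hmm
            have hk := hks k List.mem_cons_self
            obtain ⟨s1v, s1m⟩ := ih i (k - 1) m (by omega) hmm
            obtain ⟨s2v, s2m⟩ := ih k j _ (by omega) s1m
            simp only [List.foldl_cons, s1v, s2v]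
            exact ihk (fun x hx => hks x (List.mem_cons_of_mem _ hx)) _ _ s2m
        have hseed : ∀ (m : PySem.Dict (Nat × Nat) Int), pvInv l alpha m →
            ∀ acc, acc = (if pvPair l i j ∈ pvValid then
                min (min (pvE l alpha (i + 1) j) (pvE l alpha i (j - 1)))
                  (pvE l alpha (i + 1) (j - 1) + pvAlphaGet alpha (pvPair l i j))
              else min (pvE l alpha (i + 1) j) (pvE l alpha i (j - 1))) →
            ((List.range' (i + 1) (j - (i + 1))).foldl (fun st k =>
                let s1 := pvBest l alpha fuel st.2 i (k - 1)
                let s2 := pvBest l alpha fuel s1.2 k j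
                (min st.1 (s1.1 + s2.1), s2.2)) (acc, m)).1 = pvE l alpha i j
            ∧ pvInv l alpha (((List.range' (i + 1) (j - (i + 1))).foldl (fun st k =>
                let s1 := pvBest l alpha fuel st.2 i (k - 1)
                let s2 := pvBest l alpha fuel s1.2 k j
                (min st.1 (s1.1 + s2.1), s2.2)) (acc, m)).2) := by
          intro m hmm acc hacc
          obtain ⟨hv, hminv⟩ := foldLem (List.range' (i + 1) (j - (i + 1)))
            (fun k hk => by have := List.mem_range'_1.mp hk; omega) acc m hmm
          refine ⟨?_, hminv⟩
          rw [hv, hacc, pvE_of_lt l alpha (i := i) (j := j) (by omega)]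
        by_cases hp : pvPair l i j ∈ pvValid
        · simp only [if_pos hp]
          obtain ⟨h3v, h3m⟩ := ih (i + 1) (j - 1) _ (by omega) h2m
          rw [h1v, h2v, h3v]
          obtain ⟨hv, hminv⟩ := hseed _ h3m
            (min (min (pvE l alpha (i + 1) j) (pvE l alpha i (j - 1)))
              (pvE l alpha (i + 1) (j - 1) + pvAlphaGet alpha (pvPair l i j)))
            (by rw [if_pos hp])
          refine ⟨hv, ?_⟩
          intro a b v hab
          rw [PySem.Dict.get?_insert] at hab
          by_cases he : (a, b) = (i, j)
          · rw [if_pos he] at hab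
            cases hab
            rw [hv]
            cases he
            rfl
          · rw [if_neg he] at hab
            exact hminv a b v hab
        · simp only [if_neg hp]
          rw [h1v, h2v]
          obtain ⟨hv, hminv⟩ := hseed _ h2m
            (min (pvE l alpha (i + 1) j) (pvE l alpha i (j - 1)))
            (by rw [if_neg hp])
          refine ⟨hv, ?_⟩
          intro a b v hab
          rw [PySem.Dict.get?_insert] at hab
          by_cases he : (a, b) = (i, j)
          · rw [if_pos he] at hab
            cases hab
            rw [hv]
            cases he
            rfl
          · rw [if_neg he] at hab
            exact hminv a b v hab

theorem portB_eq (sequence : String) (alpha : List (String × Int)) :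
    compute_energy_matrix_alt sequence alpha
      = pvM sequence.toList alpha sequence.toList.length (fun _ _ => true) := by
  have key : ∀ (l : List Char) (n : Nat),
      ((List.range n).foldl (fun st i =>
          let r := (List.range n).foldl (fun st2 j =>
              if i < j then
                let b := pvBest l alpha n st2.2 i j
                (st2.1 ++ [b.1], b.2)
              else (st2.1 ++ [(0 : Int)], st2.2)) (([] : List Int), st.2)
          (st.1 ++ [r.1], r.2)) (([] : List (List Int)), (PySem.Dict.empty : PySem.Dict (Nat × Nat) Int))).1
      = pvM l alpha n (fun _ _ => true) := by
    intro l n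
    have rowLem : ∀ (js : List Nat), (∀ j ∈ js, j ≤ n) → ∀ (i : Nat) (acc : List Int)
        (m : PySem.Dict (Nat × Nat) Int), pvInv l alpha m →
        (js.foldl (fun st2 j =>
            if i < j then
              let b := pvBest l alpha n st2.2 i j
              (st2.1 ++ [b.1], b.2)
            else (st2.1 ++ [(0 : Int)], st2.2)) (acc, m)).1
          = acc ++ js.map (fun j => if i < j then pvE l alpha i j else 0)
        ∧ pvInv l alpha ((js.foldl (fun st2 j =>
            if i < j then
              let b := pvBest l alpha n st2.2 i j
              (st2.1 ++ [b.1], b.2)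
            else (st2.1 ++ [(0 : Int)], st2.2)) (acc, m)).2) := by
      intro js
      induction js with
      | nil => exact fun _ i acc m hm => ⟨by simp, hm⟩
      | cons j js ihj =>
        intro hjs i acc m hm
        have hj := hjs j List.mem_cons_self
        by_cases hij : i < j
        · obtain ⟨hbv, hbm⟩ := pvBest_sound l alpha n i j m (by omega) hm
          simp only [List.foldl_cons, if_pos hij, hbv]
          obtain ⟨h1, h2⟩ := ihj (fun x hx => hjs x (List.mem_cons_of_mem _ hx)) i
            (acc ++ [pvE l alpha i j]) _ hbm
          rw [h1]
          refine ⟨by simp [List.map_cons, if_pos hij], h2⟩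
        · simp only [List.foldl_cons, if_neg hij]
          obtain ⟨h1, h2⟩ := ihj (fun x hx => hjs x (List.mem_cons_of_mem _ hx)) i
            (acc ++ [(0 : Int)]) m hm
          rw [h1]
          refine ⟨by simp [List.map_cons, if_neg hij], h2⟩
    have outLem : ∀ (is : List Nat) (acc : List (List Int))
        (m : PySem.Dict (Nat × Nat) Int), pvInv l alpha m →
        (is.foldl (fun st i =>
            let r := (List.range n).foldl (fun st2 j =>
                if i < j then
                  let b := pvBest l alpha n st2.2 i j
                  (st2.1 ++ [b.1], b.2)
                else (st2.1 ++ [(0 : Int)], st2.2)) (([] : List Int), st.2)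
            (st.1 ++ [r.1], r.2)) (acc, m)).1
          = acc ++ is.map (fun i => (List.range n).map (fun j => if i < j then pvE l alpha i j else 0)) := by
      intro is
      induction is with
      | nil => intro acc m _; simp
      | cons i is ihi =>
        intro acc m hm
        obtain ⟨h1, h2⟩ := rowLem (List.range n) (fun x hx => by
            rw [List.mem_range] at hx; omega) i [] m hm
        simp only [List.foldl_cons, h1, List.nil_append]
        rw [ihi _ _ h2]
        simp
    have hempty : pvInv l alpha (PySem.Dict.empty : PySem.Dict (Nat × Nat) Int) := by
      intro a b v h
      rw [PySem.Dict.get?_empty] at h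
      exact absurd h (by simp)
    rw [outLem (List.range n) [] _ hempty]
    unfold pvM
    simp
  exact key sequence.toList sequence.toList.length

-- ===== VERDICT (by name: the statement is the Claim_ definition above) =====
theorem compute_energy_matrix_spec : Claim_equal_compute_energy_matrix := by
  intro sequence alpha _ _
  unfold Spec_compute_energy_matrix
  rw [portA_eq, portB_eq]
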